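-- pv_equiv track=rewrite | github.com/Luksuz/mixed-content-generator-server | app/utils/srt_utils.py | _split_text_into_segments
-- ===== SOURCE A (Python) =====
-- def _split_text_into_segments(original_text_lines: list[str], max_words: int) -> list[str]:
--     """
--     Reformats a list of text lines to adhere to a maximum number of words per line.
--     Each string in the returned list is a new text segment.
--     """
--     if not original_text_lines:
--         return []
--     full_text = " ".join(line.strip() for line in original_text_lines if line.strip())
--     words = full_text.split()
--     if not words:
--         return [""] # Represents an originally empty text block
--
--     new_text_segments = []
--     current_line_words = []
--     for word in words:
--         current_line_words.append(word)
--         if len(current_line_words) == max_words: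
--             new_text_segments.append(" ".join(current_line_words))
--             current_line_words = []
--     if current_line_words:
--         new_text_segments.append(" ".join(current_line_words))
--
--     return new_text_segments if new_text_segments else [""] # Should always have at least one segment if words existed
-- ===== SOURCE B (Python) =====
-- def _split_text_into_segments(original_text_lines: list[str], max_words: int) -> list[str]:
--     if not original_text_lines:
--         return []
--     words = " ".join(line.strip() for line in original_text_lines if line.strip()).split()
--     if not words:
--         return [""]
--     step = max_words if max_words > 0 else len(words)
--     return [" ".join(words[i:i + step]) for i in range(0, len(words), step)]
-- ===== Notes on version B (the rewrite author's own statement) =====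
-- stated objective: simpler
-- what changed: Replaces the word-by-word accumulate/flush loop and its trailing-remainder flush with a single stride-slicing comprehension over chunk-start indices (step = max_words, or one chunk when max_words <= 0).
import Mathlib
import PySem

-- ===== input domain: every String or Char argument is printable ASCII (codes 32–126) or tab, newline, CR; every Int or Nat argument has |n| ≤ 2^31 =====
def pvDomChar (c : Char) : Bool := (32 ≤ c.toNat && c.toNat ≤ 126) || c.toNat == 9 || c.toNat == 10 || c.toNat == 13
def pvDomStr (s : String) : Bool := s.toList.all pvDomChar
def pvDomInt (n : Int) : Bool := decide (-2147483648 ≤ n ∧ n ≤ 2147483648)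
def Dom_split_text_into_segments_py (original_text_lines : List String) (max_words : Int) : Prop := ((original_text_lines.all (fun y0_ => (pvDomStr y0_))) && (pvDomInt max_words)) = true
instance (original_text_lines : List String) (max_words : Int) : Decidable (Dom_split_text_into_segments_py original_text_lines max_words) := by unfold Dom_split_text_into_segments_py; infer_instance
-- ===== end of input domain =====

-- B replaces A's accumulate/flush word loop with a stride-slicing pass over chunk-start indices (objective: simpler).

-- ===== PORT A =====
-- step function of A's for-loop: state = (new_text_segments, current_line_words)
def pvStepA (max_words : Int) (st : List String × List String) (word : String) :
    List String × List String :=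
  let cur := st.2 ++ [word]
  if (cur.length : Int) = max_words then (st.1 ++ [PySem.Str.join " " cur], [])
  else (st.1, cur)

def split_text_into_segments_py (original_text_lines : List String) (max_words : Int) : List String :=
  if original_text_lines = [] then []
  else
    let full_text := PySem.Str.join " "
      ((original_text_lines.filter (fun line => PySem.Str.strip line ≠ "")).map
        (fun line => PySem.Str.strip line))
    let words := PySem.Str.split₀ full_text
    if words = [] then [""]
    else
      let st := words.foldl (pvStepA max_words) ([], [])
      let segs := if st.2 ≠ [] then st.1 ++ [PySem.Str.join " " st.2] else st.1
      if segs = [] then [""] else segs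

-- ===== PORT B =====
def split_text_into_segments_py_alt (original_text_lines : List String) (max_words : Int) : List String :=
  if original_text_lines = [] then []
  else
    let words := PySem.Str.split₀ (PySem.Str.join " "
      ((original_text_lines.filter (fun line => PySem.Str.strip line ≠ "")).map
        (fun line => PySem.Str.strip line)))
    if words = [] then [""]
    else
      let step : Int := if max_words > 0 then max_words else (words.length : Int)
      (PySem.List.pyRange 0 (words.length : Int) step).map
        (fun i => PySem.Str.join " " (PySem.List.slice words (some i) (some (i + step))))

-- ===== PRECONDITION & SPEC =====
def Spec_split_text_into_segments_py (original_text_lines : List String) (max_words : Int) (out : List String) : Prop := out = split_text_into_segments_py_alt original_text_lines max_words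
instance (original_text_lines : List String) (max_words : Int) (out : List String) : Decidable (Spec_split_text_into_segments_py original_text_lines max_words out) := by unfold Spec_split_text_into_segments_py; infer_instance

-- ===== CLAIM (what is proved, stated in full; the proofs are below) =====
def Claim_equal_split_text_into_segments_py : Prop := ∀ (original_text_lines : List String) (max_words : Int), Dom_split_text_into_segments_py original_text_lines max_words → Spec_split_text_into_segments_py original_text_lines max_words (split_text_into_segments_py original_text_lines max_words)

-- ===== LEMMAS AND PROOFS =====

-- proof-side reference chunking: chunks of size k+1, words joined
def pvChunkJoin (k : Nat) (ws : List String) : List String :=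
  if h : ws = [] then []
  else PySem.Str.join " " (ws.take (k+1)) :: pvChunkJoin k (ws.drop (k+1))
termination_by ws.length
decreasing_by
  cases ws with
  | nil => exact absurd rfl h
  | cons a l => simp

theorem pvChunkJoin_nil (k : Nat) : pvChunkJoin k [] = [] := by
  unfold pvChunkJoin
  simp

theorem pvChunkJoin_cons (k : Nat) (w : String) (rest : List String) :
    pvChunkJoin k (w :: rest) =
      PySem.Str.join " " (w :: rest.take k) :: pvChunkJoin k (rest.drop k) := by
  conv_lhs => unfold pvChunkJoin
  simp

-- pyRange with a positive step: nil, cons and shift forms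
theorem pvRange_pos_nil (a b s : Int) (hs : 0 < s) (h : b ≤ a) :
    PySem.List.pyRange a b s = [] := by
  rw [PySem.List.pyRange_of_pos a b hs]
  simp [show ¬ a < b by omega]

theorem pvRange_pos_cons (a b s : Int) (hs : 0 < s) (h : a < b) :
    PySem.List.pyRange a b s = a :: PySem.List.pyRange (a + s) b s := by
  rw [PySem.List.pyRange_of_pos a b hs, PySem.List.pyRange_of_pos (a + s) b hs]
  have key : b - a + s - 1 = (b - a - 1) + 1 * s := by ring
  have h1 : (b - a + s - 1) / s = (b - a - 1) / s + 1 := by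
    rw [key, Int.add_mul_ediv_right _ _ hs.ne']
  by_cases h2 : a + s < b
  · have key2 : b - (a + s) + s - 1 = (b - a - s - 1) + 1 * s := by ring
    have h3 : (b - (a + s) + s - 1) / s = (b - a - s - 1) / s + 1 := by
      rw [key2, Int.add_mul_ediv_right _ _ hs.ne']
    have h4 : b - a - s - 1 = (b - a - 1) + (-1) * s := by ring
    have h5 : (b - a - s - 1) / s = (b - a - 1) / s + (-1) := by
      rw [h4, Int.add_mul_ediv_right _ _ hs.ne']
    have hnn : 0 ≤ (b - a - 1) / s := Int.ediv_nonneg (by omega) hs.le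
    simp only [if_pos h, if_pos h2, h1, h3, h5]
    have hC : ((b - a - 1) / s + 1).toNat = ((b - a - 1) / s + -1 + 1).toNat + 1 := by omega
    rw [hC, List.range_succ_eq_map, List.map_cons, List.map_map]
    have hhead : a + s * ((0 : Nat) : Int) = a := by push_cast; ring
    rw [List.cons_eq_cons]
    refine ⟨hhead, ?_⟩
    apply List.map_congr_left
    intro x _
    simp only [Function.comp_apply]
    push_cast
    ring
  · have hz : (b - a - 1) / s = 0 :=
      Int.ediv_eq_zero_of_lt (by omega) (by omega)
    simp only [if_pos h, if_neg h2, h1, hz]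
    simp

theorem pvRange_pos_shift (a b s : Int) (hs : 0 < s) :
    PySem.List.pyRange a b s = (PySem.List.pyRange 0 (b - a) s).map (fun i => i + a) := by
  rw [PySem.List.pyRange_of_pos a b hs, PySem.List.pyRange_of_pos 0 (b - a) hs]
  rw [List.map_map]
  have hz : b - a - 0 = b - a := by ring
  have hcount : (if a < b then ((b - a + s - 1) / s).toNat else 0)
      = (if 0 < b - a then ((b - a - 0 + s - 1) / s).toNat else 0) := by
    rw [hz]
    by_cases hab : a < b
    · rw [if_pos hab, if_pos (by omega)]
    · rw [if_neg hab, if_neg (by omega)]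
  rw [hcount]
  apply List.map_congr_left
  intro x _
  simp only [Function.comp_apply]
  ring

-- A's loop never flushes while the running total stays below n+1
theorem pvNoFlush (n : Nat) :
    ∀ (ws cur acc : List String), cur.length + ws.length < n + 1 →
      ws.foldl (pvStepA ((n : Int) + 1)) (acc, cur) = (acc, cur ++ ws) := by
  intro ws
  induction ws with
  | nil => intro cur acc _; simp
  | cons w rest ih =>
      intro cur acc h
      simp only [List.length_cons] at h
      simp only [List.foldl_cons, pvStepA]
      rw [if_neg (by simp only [List.length_append, List.length_cons, List.length_nil]; push_cast; omega)]
      rw [ih (cur ++ [w]) acc (by simp only [List.length_append, List.length_cons, List.length_nil]; omega)]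
      simp

-- A's loop flushes exactly once when the words complete a chunk of size n+1
theorem pvFlush (n : Nat) :
    ∀ (ws cur acc : List String), ws ≠ [] → cur.length + ws.length = n + 1 →
      ws.foldl (pvStepA ((n : Int) + 1)) (acc, cur) =
        (acc ++ [PySem.Str.join " " (cur ++ ws)], []) := by
  intro ws
  induction ws with
  | nil => intro _ _ h _; exact absurd rfl h
  | cons w rest ih =>
      intro cur acc _ h
      simp only [List.length_cons] at h
      simp only [List.foldl_cons, pvStepA]
      by_cases hr : rest = []
      · subst hr
        rw [if_pos (by simp only [List.length_append, List.length_cons, List.length_nil] at h ⊢; push_cast; omega)]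
        simp
      · have hrl : 0 < rest.length := List.length_pos_iff.mpr hr
        rw [if_neg (by simp only [List.length_append, List.length_cons, List.length_nil]; push_cast; omega)]
        rw [ih (cur ++ [w]) acc hr (by simp only [List.length_append, List.length_cons, List.length_nil]; omega)]
        simp

-- A's whole loop (plus the final flush) computes pvChunkJoin
theorem pvLoopEqChunk (k : Nat) (ws : List String) : ∀ acc : List String,
    (if (ws.foldl (pvStepA ((k : Int) + 1)) (acc, [])).2 ≠ [] then
       (ws.foldl (pvStepA ((k : Int) + 1)) (acc, [])).1 ++
         [PySem.Str.join " " (ws.foldl (pvStepA ((k : Int) + 1)) (acc, [])).2]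
     else (ws.foldl (pvStepA ((k : Int) + 1)) (acc, [])).1) =
    acc ++ pvChunkJoin k ws := by
  intro acc
  match ws with
  | [] => simp [pvChunkJoin_nil]
  | w :: rest =>
    by_cases hlen : (w :: rest).length < k + 1
    · rw [pvNoFlush k (w :: rest) [] acc (by simp at hlen ⊢; omega)]
      have hrk : rest.length < k := by simp at hlen; omega
      have h1 : rest.take k = rest := List.take_of_length_le (by omega)
      have h2 : rest.drop k = [] := List.drop_eq_nil_of_le (by omega)
      simp [pvChunkJoin_cons, h1, h2, pvChunkJoin_nil]
    · have hk2 : k ≤ rest.length := by simp at hlen; omega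
      have hsplit : w :: rest = (w :: rest.take k) ++ rest.drop k := by
        rw [List.cons_append, List.take_append_drop]
      conv_lhs => rw [hsplit]
      rw [List.foldl_append]
      rw [pvFlush k (w :: rest.take k) [] acc (by simp)
          (by simp [List.length_take, Nat.min_eq_left hk2])]
      have hrec := pvLoopEqChunk k (rest.drop k)
        (acc ++ [PySem.Str.join " " (w :: rest.take k)])
      simp only [List.nil_append] at hrec ⊢
      rw [hrec]
      rw [pvChunkJoin_cons]
      simp
termination_by ws.length
decreasing_by simp [List.length_drop]

-- B's stride map computes pvChunkJoin
theorem pvStrideEqChunk (k : Nat) (ws : List String) :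
    (PySem.List.pyRange 0 (ws.length : Int) ((k : Int) + 1)).map
      (fun i => PySem.Str.join " " (PySem.List.slice ws (some i) (some (i + ((k : Int) + 1))))) =
    pvChunkJoin k ws := by
  match ws with
  | [] => simp [pvRange_pos_nil 0 0 ((k:Int)+1) (by omega) le_rfl, pvChunkJoin_nil]
  | w :: rest =>
    have hs : (0:Int) < (k : Int) + 1 := by omega
    have hL : (0:Int) < ((w :: rest).length : Int) := by simp
    rw [pvRange_pos_cons 0 _ _ hs hL]
    simp only [List.map_cons, zero_add]
    have hhead : PySem.List.slice (w :: rest) (some 0) (some ((k:Int)+1)) = w :: rest.take k := by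
      have hcast : ((k:Int) + 1) = ((k+1 : Nat) : Int) := by push_cast; ring
      rw [hcast, PySem.List.slice_zero_start, PySem.List.slice_to_natCast]
      simp
    rw [hhead]
    by_cases hlen : (w :: rest).length ≤ k + 1
    · have hrk : rest.length ≤ k := by simp at hlen; omega
      have h2 : rest.drop k = [] := List.drop_eq_nil_of_le (by omega)
      have h1 : rest.take k = rest := List.take_of_length_le (by omega)
      rw [pvRange_pos_nil _ _ _ hs (by simp; omega)]
      simp [pvChunkJoin_cons, h1, h2, pvChunkJoin_nil]
    · have hlen' : k + 1 < (w :: rest).length := by omega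
      rw [pvRange_pos_shift ((k:Int)+1) ((w :: rest).length : Int) ((k:Int)+1) hs]
      rw [List.map_map]
      have hdroplen : ((((w :: rest).drop (k+1)).length : Nat) : Int)
          = ((w :: rest).length : Int) - ((k:Int)+1) := by
        simp only [List.length_drop]
        push_cast [Nat.cast_sub (le_of_lt hlen')]
        ring
      have hcong :
          ∀ i ∈ PySem.List.pyRange 0 (((w :: rest).length : Int) - ((k:Int)+1)) ((k:Int)+1),
            ((fun i => PySem.Str.join " " (PySem.List.slice (w :: rest)
              (some i) (some (i + ((k:Int)+1))))) ∘ (fun i => i + ((k:Int)+1))) i =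
            PySem.Str.join " " (PySem.List.slice ((w :: rest).drop (k+1))
              (some i) (some (i + ((k:Int)+1)))) := by
        intro i hi
        have hi0 : 0 ≤ i := (PySem.List.mem_pyRange_iff_of_pos hs i).mp hi |>.1
        simp only [Function.comp_apply]
        congr 1
        rw [PySem.List.slice_toNat _ (by omega : (0:Int) ≤ i + ((k:Int)+1)) (by omega : (0:Int) ≤ i + ((k:Int)+1) + ((k:Int)+1)),
            PySem.List.slice_toNat _ hi0 (by omega : (0:Int) ≤ i + ((k:Int)+1))]
        rw [List.drop_drop]
        rw [show (i + ((k:Int)+1)).toNat = i.toNat + (k+1) by omega,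
            show (i + ((k:Int)+1) + ((k:Int)+1)).toNat - (i.toNat + (k+1)) = k+1 by omega]
        rw [show i.toNat + (k+1) - i.toNat = k+1 by omega,
            show k + 1 + i.toNat = i.toNat + (k+1) by omega]
      rw [List.map_congr_left hcong]
      rw [← hdroplen]
      have htail := pvStrideEqChunk k ((w :: rest).drop (k+1))
      rw [htail]
      rw [pvChunkJoin_cons]
      have hdd : (w :: rest).drop (k+1) = rest.drop k := by simp
      rw [hdd]
termination_by ws.length
decreasing_by simp [List.length_drop]

-- max_words ≤ 0: A keeps everything in one segment, B takes one full-length stride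
theorem pvNonposCase (M : Int) (hM : M ≤ 0) (ws : List String) (hws : ws ≠ []) :
    (if (if (ws.foldl (pvStepA M) ([], [])).2 ≠ [] then
           (ws.foldl (pvStepA M) ([], [])).1 ++
             [PySem.Str.join " " (ws.foldl (pvStepA M) ([], [])).2]
         else (ws.foldl (pvStepA M) ([], [])).1) = [] then [""]
     else (if (ws.foldl (pvStepA M) ([], [])).2 ≠ [] then
           (ws.foldl (pvStepA M) ([], [])).1 ++
             [PySem.Str.join " " (ws.foldl (pvStepA M) ([], [])).2]
         else (ws.foldl (pvStepA M) ([], [])).1)) =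
    (PySem.List.pyRange 0 (ws.length : Int) ((ws.length : Int))).map
      (fun i => PySem.Str.join " " (PySem.List.slice ws (some i) (some (i + (ws.length : Int))))) := by
  have hnoflush : ∀ (xs cur acc : List String),
      xs.foldl (pvStepA M) (acc, cur) = (acc, cur ++ xs) := by
    intro xs
    induction xs with
    | nil => intro cur acc; simp
    | cons x rest ih =>
        intro cur acc
        simp only [List.foldl_cons, pvStepA]
        rw [if_neg (by simp only [List.length_append, List.length_cons, List.length_nil]; push_cast; omega)]
        rw [ih (cur ++ [x]) acc]
        simp
  have hL : (0:Int) < (ws.length : Int) := by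
    cases ws with
    | nil => exact absurd rfl hws
    | cons a l => simp
  rw [hnoflush ws [] []]
  rw [pvRange_pos_cons 0 _ _ hL hL, pvRange_pos_nil _ _ _ hL (by omega)]
  simp [hws]

-- ===== VERDICT (by name: the statement is the Claim_ definition above) =====
theorem split_text_into_segments_py_spec : Claim_equal_split_text_into_segments_py := by
  intro lines M _
  unfold Spec_split_text_into_segments_py
  by_cases h0 : lines = []
  · simp [split_text_into_segments_py, split_text_into_segments_py_alt, h0]
  · simp only [split_text_into_segments_py, split_text_into_segments_py_alt, if_neg h0]
    set ws := PySem.Str.split₀ (PySem.Str.join " "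
      ((lines.filter (fun line => PySem.Str.strip line ≠ "")).map
        (fun line => PySem.Str.strip line))) with hws
    by_cases hw : ws = []
    · rw [if_pos hw, if_pos hw]
    · rw [if_neg hw, if_neg hw]
      by_cases hpos : M > 0
      · rw [if_pos hpos]
        obtain ⟨k, hk⟩ : ∃ k : Nat, M = (k : Int) + 1 := ⟨(M - 1).toNat, by omega⟩
        subst hk
        rw [pvStrideEqChunk k ws]
        have hloop := pvLoopEqChunk k ws []
        simp only [List.nil_append] at hloop
        rw [hloop]
        have hne : ∀ vs : List String, vs ≠ [] → pvChunkJoin k vs ≠ [] := by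
          intro vs hvs
          match vs with
          | [] => exact absurd rfl hvs
          | a :: l => simp [pvChunkJoin_cons]
        rw [if_neg (hne ws hw)]
      · rw [if_neg hpos]
        exact pvNonposCase M (by omega) ws hw
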